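-- pv_equiv track=rewrite | github.com/vbwyrde/N8N_Builder | Self-Healer/core/context_analyzer.py | _build_dependency_chain
-- ===== SOURCE A (Python) =====
-- from typing import Dict, List, Optional, Any, Set, Tuple
--
-- def _build_dependency_chain(components: List[str]) -> List[str]:
--     """Build a simplified dependency chain for components."""
--     # This is a simplified version - could be enhanced with actual dependency analysis
--     dependency_order = [
--         'config.py',
--         'logging_config.py',
--         'error_handler.py',
--         'validators.py',
--         'performance_optimizer.py',
--         'retry_manager.py',
--         'enhanced_prompt_builder.py',
--         'n8n_builder.py',
--         'project_manager.py',
--         'app.py'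
--     ]
--
--     # Return components in dependency order
--     ordered_components = []
--     for component in dependency_order:
--         if component in components:
--             ordered_components.append(component)
--
--     # Add any remaining components
--     for component in components:
--         if component not in ordered_components:
--             ordered_components.append(component)
--
--     return ordered_components
-- ===== SOURCE B (Python) =====
-- def _build_dependency_chain(components):
--     """Build a simplified dependency chain for components."""
--     deps = [
--         'config.py',
--         'logging_config.py',
--         'error_handler.py',
--         'validators.py',
--         'performance_optimizer.py',
--         'retry_manager.py',
--         'enhanced_prompt_builder.py',
--         'n8n_builder.py',
--         'project_manager.py',
--         'app.py'
--     ]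
--     n = len(deps)
--     buckets = [[] for _ in range(n + 1)]
--     seen = set()
--     for c in components:
--         if c not in seen:
--             seen.add(c)
--             buckets[deps.index(c) if c in deps else n].append(c)
--     return [c for b in buckets for c in b]
-- ===== Notes on version B (the rewrite author's own statement) =====
-- stated objective: faster
-- what changed: Replaces A's two scanning passes (a pass over the fixed dependency list with a membership scan of components, then a pass over components with a growing 'not in ordered_components' list scan) by a single deduplicating bucket pass: each first occurrence, detected via a set, is dropped into the bucket of its dependency index (or the remainder bucket), and the buckets are concatenated.
import Mathlib
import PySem

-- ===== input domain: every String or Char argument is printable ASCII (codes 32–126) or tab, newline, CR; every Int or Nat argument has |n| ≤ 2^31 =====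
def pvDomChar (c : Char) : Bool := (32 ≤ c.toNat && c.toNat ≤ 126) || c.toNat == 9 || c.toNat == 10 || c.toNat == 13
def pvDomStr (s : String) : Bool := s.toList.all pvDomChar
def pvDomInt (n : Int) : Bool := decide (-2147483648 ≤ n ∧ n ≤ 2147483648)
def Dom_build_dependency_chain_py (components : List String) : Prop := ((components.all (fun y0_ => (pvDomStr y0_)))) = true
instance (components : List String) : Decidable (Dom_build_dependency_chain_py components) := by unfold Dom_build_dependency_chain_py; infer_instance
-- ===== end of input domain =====

-- B replaces A's quadratic two-pass scan (linear membership tests on a growing list) by a single set-deduplicating bucket pass (objective: faster; measured faster in a timing run).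

-- the module's fixed dependency-order constant (data shared by both Pythons)
def pvDepOrder : List String :=
  ["config.py", "logging_config.py", "error_handler.py", "validators.py",
   "performance_optimizer.py", "retry_manager.py", "enhanced_prompt_builder.py",
   "n8n_builder.py", "project_manager.py", "app.py"]

-- ===== PORT A =====
def build_dependency_chain_py (components : List String) : List String :=
  let ordered := pvDepOrder.foldl
    (fun acc component => if components.contains component then acc ++ [component] else acc) []
  components.foldl
    (fun acc component => if acc.contains component then acc else acc ++ [component]) ordered

-- ===== PORT B =====
def build_dependency_chain_py_alt (components : List String) : List String :=
  let n := pvDepOrder.length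
  let st := components.foldl
    (fun (st : PySem.Set String × List (List String)) c =>
      if PySem.Set.contains st.1 c then st
      else
        let i := if pvDepOrder.contains c then pvDepOrder.idxOf c else n
        (PySem.Set.add st.1 c, st.2.set i ((st.2.getD i []) ++ [c])))
    (PySem.Set.empty, List.replicate (n + 1) [])
  st.2.flatten

-- ===== PRECONDITION & SPEC =====
def Spec_build_dependency_chain_py (components : List String) (out : List String) : Prop := out = build_dependency_chain_py_alt components
instance (components : List String) (out : List String) : Decidable (Spec_build_dependency_chain_py components out) := by unfold Spec_build_dependency_chain_py; infer_instance

-- ===== CLAIM (what is proved, stated in full; the proofs are below) =====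
def Claim_equal_build_dependency_chain_py : Prop := ∀ (components : List String), Dom_build_dependency_chain_py components → Spec_build_dependency_chain_py components (build_dependency_chain_py components)

-- ===== LEMMAS AND PROOFS =====

-- remainder items: first occurrences (relative to 'seen') of elements outside pvDepOrder, in order
def pvRem (seen : List String) : List String → List String
  | [] => []
  | c :: t => if c ∈ pvDepOrder ∨ c ∈ seen then pvRem seen t else c :: pvRem (c :: seen) t

theorem pvRem_congr (t : List String) (s₁ s₂ : List String)
    (h : ∀ y, (y ∈ pvDepOrder ∨ y ∈ s₁) ↔ (y ∈ pvDepOrder ∨ y ∈ s₂)) :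
    pvRem s₁ t = pvRem s₂ t := by
  induction t generalizing s₁ s₂ with
  | nil => rfl
  | cons c t ih =>
    simp only [pvRem]
    by_cases hc : c ∈ pvDepOrder ∨ c ∈ s₁
    · rw [if_pos hc, if_pos ((h c).1 hc)]
      exact ih s₁ s₂ h
    · rw [if_neg hc, if_neg (fun hb => hc ((h c).2 hb))]
      refine congrArg _ (ih (c :: s₁) (c :: s₂) fun y => ?_)
      simp only [List.mem_cons]
      constructor
      · rintro (hy | hy | hy)
        · exact Or.inl hy
        · exact Or.inr (Or.inl hy)
        · rcases (h y).1 (Or.inr hy) with h' | h'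
          · exact Or.inl h'
          · exact Or.inr (Or.inr h')
      · rintro (hy | hy | hy)
        · exact Or.inl hy
        · exact Or.inr (Or.inl hy)
        · rcases (h y).2 (Or.inr hy) with h' | h'
          · exact Or.inl h'
          · exact Or.inr (Or.inr h')

theorem pvRem_cons_dep (c : String) (seen t : List String) (hc : c ∈ pvDepOrder) :
    pvRem (c :: seen) t = pvRem seen t :=
  pvRem_congr t _ _ (fun y => by
    simp only [List.mem_cons]
    constructor
    · rintro (h | rfl | h)
      · exact Or.inl h
      · exact Or.inl hc
      · exact Or.inr h
    · rintro (h | h)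
      · exact Or.inl h
      · exact Or.inr (Or.inr h))

-- A's second (deduplicating) loop characterised
theorem pvAloop (t : List String) (acc seen : List String)
    (H : ∀ x ∈ t, (x ∈ acc ↔ x ∈ pvDepOrder ∨ x ∈ seen)) :
    t.foldl (fun acc c => if acc.contains c then acc else acc ++ [c]) acc
      = acc ++ pvRem seen t := by
  induction t generalizing acc seen with
  | nil => simp [pvRem]
  | cons c t ih =>
    simp only [List.foldl_cons, pvRem]
    by_cases hc : c ∈ acc
    · have hmem : c ∈ pvDepOrder ∨ c ∈ seen := (H c (by simp)).1 hc
      rw [if_pos (show acc.contains c = true by simpa using hc), if_pos hmem]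
      exact ih acc seen (fun x hx => H x (by simp [hx]))
    · have hmem : ¬ (c ∈ pvDepOrder ∨ c ∈ seen) := fun h => hc ((H c (by simp)).2 h)
      rw [if_neg (show ¬ acc.contains c = true by simpa using hc), if_neg hmem]
      rw [ih (acc ++ [c]) (c :: seen) (fun x hx => by
        simp only [List.mem_append, List.mem_cons, List.not_mem_nil, or_false]
        constructor
        · rintro (h | h)
          · rcases (H x (by simp [hx])).1 h with h' | h'
            · exact Or.inl h'
            · exact Or.inr (Or.inr h')
          · exact Or.inr (Or.inl h)
        · rintro (h | h | h)
          · exact Or.inl ((H x (by simp [hx])).2 (Or.inl h))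
          · exact Or.inr h
          · exact Or.inl ((H x (by simp [hx])).2 (Or.inr h)))]
      simp

theorem pvFlatten_map_ite (l : List String) (p : String → Prop) [DecidablePred p] :
    (l.map fun d => if p d then [d] else []).flatten
      = l.filter (fun d => decide (p d)) := by
  induction l with
  | nil => rfl
  | cons d l ih =>
    by_cases hd : p d <;> simp [hd, ih]

-- single-step bucket updates
theorem pvSetDep (s r : List String) (c : String) (hdep : c ∈ pvDepOrder) (hcs : c ∉ s) :
    ((pvDepOrder.map fun d => if d ∈ s then [d] else []) ++ [r]).set (pvDepOrder.idxOf c)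
      ((((pvDepOrder.map fun d => if d ∈ s then [d] else []) ++ [r]).getD (pvDepOrder.idxOf c) []) ++ [c])
    = (pvDepOrder.map fun d => if d ∈ c :: s then [d] else []) ++ [r] := by
  have hlt : pvDepOrder.idxOf c < pvDepOrder.length := List.idxOf_lt_length_of_mem hdep
  have hltm : pvDepOrder.idxOf c < (pvDepOrder.map fun d => if d ∈ s then [d] else []).length := by
    simpa using hlt
  rw [List.getD_append _ _ _ _ hltm, List.set_append_left _ _ hltm]
  have hget : (pvDepOrder.map fun d => if d ∈ s then [d] else []).getD (pvDepOrder.idxOf c) [] = [] := by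
    rw [List.getD_eq_getElem _ _ hltm]
    simp only [List.getElem_map, List.getElem_idxOf hlt]
    simp [hcs]
  rw [hget]
  refine congrArg (· ++ [r]) ?_
  have hnd : pvDepOrder.Nodup := by decide
  apply List.ext_getElem
  · simp
  · intro j hj hj'
    simp only [List.length_set, List.length_map] at hj hj'
    simp only [List.getElem_set, List.getElem_map]
    by_cases hji : pvDepOrder.idxOf c = j
    · subst hji
      rw [if_pos rfl, List.getElem_idxOf hlt]
      simp
    · rw [if_neg hji]
      have hne : pvDepOrder[j]'hj' ≠ c := by
        intro hEq
        exact hji ((hnd.getElem_inj_iff (hi := hlt) (hj := hj')).mp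
          (by rw [List.getElem_idxOf hlt, hEq]))
      refine (if_congr ?_ rfl rfl)
      simp only [List.mem_cons]
      tauto

theorem pvSetRem (s r : List String) (c : String) (hdep : c ∉ pvDepOrder) :
    ((pvDepOrder.map fun d => if d ∈ s then [d] else []) ++ [r]).set pvDepOrder.length
      ((((pvDepOrder.map fun d => if d ∈ s then [d] else []) ++ [r]).getD pvDepOrder.length []) ++ [c])
    = (pvDepOrder.map fun d => if d ∈ c :: s then [d] else []) ++ [r ++ [c]] := by
  have hlen : (pvDepOrder.map fun d => if d ∈ s then [d] else []).length = pvDepOrder.length := by simp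
  rw [← hlen]
  rw [show ((pvDepOrder.map fun d => if d ∈ s then [d] else []) ++ [r]).getD
        (pvDepOrder.map fun d => if d ∈ s then [d] else []).length [] = r by
      rw [List.getD_eq_getElem?_getD]; simp]
  rw [List.set_append_right _ _ (Nat.le_refl _)]
  simp only [Nat.sub_self, List.set_cons_zero]
  refine congrArg (· ++ [r ++ [c]]) (List.map_congr_left fun d hd => ?_)
  refine if_congr ?_ rfl rfl
  simp only [List.mem_cons]
  constructor
  · exact fun h => Or.inr h
  · rintro (h | h)
    · exact absurd (h ▸ hd) hdep
    · exact h

-- B's single bucket pass characterised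
theorem pvBloop (t : List String) (S : PySem.Set String) (s r : List String)
    (hS : ∀ x, PySem.Set.contains S x = true ↔ x ∈ s) :
    (t.foldl
      (fun (st : PySem.Set String × List (List String)) c =>
        if PySem.Set.contains st.1 c then st
        else
          let i := if pvDepOrder.contains c then pvDepOrder.idxOf c else pvDepOrder.length
          (PySem.Set.add st.1 c, st.2.set i ((st.2.getD i []) ++ [c])))
      (S, (pvDepOrder.map fun d => if d ∈ s then [d] else []) ++ [r])).2
      = (pvDepOrder.map fun d => if d ∈ s ∨ d ∈ t then [d] else []) ++ [r ++ pvRem s t] := by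
  induction t generalizing S s r with
  | nil => simp [pvRem]
  | cons c t ih =>
    simp only [List.foldl_cons]
    have hS' : ∀ x, PySem.Set.contains (PySem.Set.add S c) x = true ↔ x ∈ c :: s := by
      intro x
      rw [PySem.Set.contains_iff, PySem.Set.mem_add, List.mem_cons]
      rw [← PySem.Set.contains_iff, hS x]
      tauto
    by_cases hc : c ∈ s
    · rw [if_pos ((hS c).2 hc)]
      rw [ih S s r hS]
      have hrem : pvRem s (c :: t) = pvRem s t := by
        simp [pvRem, hc]
      rw [hrem]
      refine congrArg (· ++ _) (List.map_congr_left fun d _ => ?_)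
      refine if_congr ?_ rfl rfl
      simp only [List.mem_cons]
      by_cases hdc : d = c
      · subst hdc; simp [hc]
      · tauto
    · rw [if_neg (fun hb => hc ((hS c).1 hb))]
      by_cases hdep : c ∈ pvDepOrder
      · rw [if_pos (show pvDepOrder.contains c = true by simpa using hdep)]
        rw [pvSetDep s r c hdep hc]
        rw [ih (PySem.Set.add S c) (c :: s) r hS']
        have hrem : pvRem s (c :: t) = pvRem (c :: s) t := by
          rw [pvRem_cons_dep c s t hdep]
          simp [pvRem, hdep]
        rw [← hrem]
        refine congrArg (· ++ _) (List.map_congr_left fun d _ => ?_)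
        refine if_congr ?_ rfl rfl
        simp only [List.mem_cons]
        tauto
      · rw [if_neg (show ¬ pvDepOrder.contains c = true by simpa using hdep)]
        rw [pvSetRem s r c hdep]
        rw [ih (PySem.Set.add S c) (c :: s) (r ++ [c]) hS']
        have hrem : pvRem s (c :: t) = c :: pvRem (c :: s) t := by
          simp [pvRem, hdep, hc]
      
        rw [hrem, List.append_cons r c (pvRem (c :: s) t)]
        refine congrArg (· ++ _) (List.map_congr_left fun d _ => ?_)
        refine if_congr ?_ rfl rfl
        simp only [List.mem_cons]
        tauto

-- ===== VERDICT (by name: the statement is the Claim_ definition above) =====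
theorem build_dependency_chain_py_spec : Claim_equal_build_dependency_chain_py := by
  intro components _
  show build_dependency_chain_py components = build_dependency_chain_py_alt components
  -- A's side
  rw [build_dependency_chain_py]
  rw [PySem.List.foldl_append_if_eq_filter, List.nil_append]
  rw [pvAloop components (pvDepOrder.filter fun d => components.contains d) []
    (fun x hx => by
      simp only [List.mem_filter, List.contains_eq_mem, decide_eq_true_eq, List.not_mem_nil, or_false]
      exact ⟨fun h => h.1, fun h => ⟨h, hx⟩⟩)]
  -- B's side
  rw [build_dependency_chain_py_alt]
  simp only []
  rw [show List.replicate (pvDepOrder.length + 1) ([] : List String)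
        = (pvDepOrder.map fun d => if d ∈ ([] : List String) then [d] else []) ++ [[]] by
      simp [pvDepOrder]]
  rw [pvBloop components PySem.Set.empty [] []
    (fun x => by simp [PySem.Set.empty])]
  rw [List.flatten_append]
  simp only [List.flatten_cons, List.flatten_nil, List.append_nil, List.nil_append]
  rw [show (pvDepOrder.map fun d => if d ∈ ([] : List String) ∨ d ∈ components then [d] else [])
        = pvDepOrder.map fun d => if d ∈ components then [d] else [] by
      refine List.map_congr_left fun d _ => if_congr (by simp) rfl rfl]
  rw [pvFlatten_map_ite pvDepOrder (fun d => d ∈ components)]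
  refine congrArg (· ++ pvRem [] components) ?_
  refine List.filter_congr fun d _ => ?_
  simp [List.contains_eq_mem]
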